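-- pv_equiv track=rewrite | github.com/reppertj/image-captioning | project/visualization.py | get_combined_idxs
-- ===== SOURCE A (Python) =====
-- def get_combined_idxs(words):
--     i = 0
--     ret = []
--     start_idx, stop_idx = -1, -1
--     while (i + 1) < len(words) and words[i + 1] != "[sep]":
--         if words[i][0] != "#" and words[i + 1][0] == "#":
--             start_idx = i
--             stop_idx = i + 2
--         elif words[i + 1][0] == "#" and start_idx > -1:
--             stop_idx += 1
--         elif start_idx != -1:
--             ret.append((start_idx, stop_idx))
--             start_idx, stop_idx = -1, -1
--         i += 1
--     if start_idx != -1: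
--         ret.append((start_idx, stop_idx))
--     return ret
-- ===== SOURCE B (Python) =====
-- def get_combined_idxs(words):
--     n = len(words)
--     limit = n
--     for j in range(1, n):
--         if words[j] == "[sep]":
--             limit = j
--             break
--     ret = []
--     i = 0
--     while i < limit:
--         if i + 1 < limit and words[i][0] != "#" and words[i + 1][0] == "#":
--             start = i
--             i += 1
--             while i + 1 < limit and words[i + 1][0] == "#":
--                 i += 1
--             ret.append((start, i + 1))
--         i += 1
--     return ret
-- ===== Notes on version B (the rewrite author's own statement) =====
-- stated objective: alternative
-- what changed: Replaces A's flat start/stop state-machine over one index with a precomputed '[sep]' limit followed by a find-head outer loop and a consume-run inner loop that emits each (start, stop) pair directly, with no carried start/stop registers.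
import Mathlib
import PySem

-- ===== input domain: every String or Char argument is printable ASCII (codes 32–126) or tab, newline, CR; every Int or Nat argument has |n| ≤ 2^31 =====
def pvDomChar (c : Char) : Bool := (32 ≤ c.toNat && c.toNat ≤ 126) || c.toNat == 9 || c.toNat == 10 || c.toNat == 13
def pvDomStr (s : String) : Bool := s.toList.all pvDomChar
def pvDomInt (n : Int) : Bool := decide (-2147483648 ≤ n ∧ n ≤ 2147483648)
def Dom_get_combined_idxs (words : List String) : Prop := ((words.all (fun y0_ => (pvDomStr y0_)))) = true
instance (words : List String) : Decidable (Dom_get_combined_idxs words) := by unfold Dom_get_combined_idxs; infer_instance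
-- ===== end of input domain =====

-- B replaces A's flat start/stop state machine with a precomputed '[sep]' limit plus a
-- find-head outer loop and a consume-run inner loop (alternative decomposition, same cost).
-- pvFirstChar s = Python's s[0] as an Option (none = IndexError on the empty string)
def pvFirstChar (s : String) : Option Char := PySem.Str.pyGet? s 0

-- ===== PORT A =====
-- A's while-loop, state (i, start_idx, stop_idx, ret); words[i] ported via getD (in range
-- whenever the loop runs), words[i][0] via pvFirstChar (exact on nonempty words, cf. Pre_).
def aLoop (words : List String) (i : Nat) (start stop : Int) (ret : List (Int × Int)) :
    List (Int × Int) :=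
  if h : i + 1 < words.length ∧ words.getD (i + 1) "" ≠ "[sep]" then
    if pvFirstChar (words.getD i "") ≠ some '#' ∧
        pvFirstChar (words.getD (i + 1) "") = some '#' then
      aLoop words (i + 1) (i : Int) ((i : Int) + 2) ret
    else if pvFirstChar (words.getD (i + 1) "") = some '#' ∧ start > -1 then
      aLoop words (i + 1) start (stop + 1) ret
    else if start ≠ -1 then
      aLoop words (i + 1) (-1) (-1) (ret ++ [(start, stop)])
    else
      aLoop words (i + 1) start stop ret
  else
    if start ≠ -1 then ret ++ [(start, stop)] else ret
termination_by words.length - i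
decreasing_by all_goals omega

def get_combined_idxs (words : List String) : List (Int × Int) :=
  aLoop words 0 (-1) (-1) []

-- ===== PORT B =====
-- B's first loop: smallest j ≥ start with words[j] == "[sep]", else len(words)
def bLimitGo (words : List String) (j : Nat) : Nat :=
  if h : j < words.length then
    if words.getD j "" = "[sep]" then j else bLimitGo words (j + 1)
  else words.length
termination_by words.length - j
decreasing_by omega

-- B's inner loop: advance i while words[i+1] starts with '#' (within limit)
def bInner (words : List String) (limit i : Nat) : Nat :=
  if h : i + 1 < limit ∧ pvFirstChar (words.getD (i + 1) "") = some '#' then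
    bInner words limit (i + 1)
  else i
termination_by limit - i
decreasing_by omega

theorem bInner_ge (words : List String) (limit i : Nat) : i ≤ bInner words limit i := by
  fun_induction bInner words limit i <;> omega

-- B's outer loop
def bOuter (words : List String) (limit i : Nat) (ret : List (Int × Int)) :
    List (Int × Int) :=
  if h : i < limit then
    if i + 1 < limit ∧ pvFirstChar (words.getD i "") ≠ some '#' ∧
        pvFirstChar (words.getD (i + 1) "") = some '#' then
      bOuter words limit (bInner words limit (i + 1) + 1)
        (ret ++ [((i : Int), ((bInner words limit (i + 1) : Nat) : Int) + 1)])
    else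
      bOuter words limit (i + 1) ret
  else ret
termination_by limit - i
decreasing_by
  · have := bInner_ge words limit (i + 1); omega
  · omega

def get_combined_idxs_alt (words : List String) : List (Int × Int) :=
  bOuter words (bLimitGo words 1) 0 []

-- ===== PRECONDITION & SPEC =====
-- Pre_ excludes exactly the inputs on which Python A raises IndexError: an empty word at an
-- index the scan reaches, i.e. strictly before the first "[sep]" at index ≥ 1 (word 0 is
-- only read when the loop runs at all, hence the max k 1 / length ≤ 1 allowances).
def Pre_get_combined_idxs (words : List String) : Prop :=
  ∀ k, k < words.length → words.getD k "" = "" →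
    (words.length ≤ 1 ∨ ∃ j, j < max k 1 + 1 ∧ 1 ≤ j ∧ words.getD j "" = "[sep]")
instance (words : List String) : Decidable (Pre_get_combined_idxs words) := by
  unfold Pre_get_combined_idxs; infer_instance

def pvWitness_get_combined_idxs : List String := ["the", "##re", "fox"]

def Spec_get_combined_idxs (words : List String) (out : List (Int × Int)) : Prop :=
  out = get_combined_idxs_alt words
instance (words : List String) (out : List (Int × Int)) :
    Decidable (Spec_get_combined_idxs words out) := by
  unfold Spec_get_combined_idxs; infer_instance

-- ===== CLAIM (what is proved, stated in full; the proofs are below) =====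
def Claim_equal_get_combined_idxs : Prop :=
  ∀ (words : List String), Dom_get_combined_idxs words → Pre_get_combined_idxs words →
    Spec_get_combined_idxs words (get_combined_idxs words)

-- ===== LEMMAS AND PROOFS =====

theorem limitGo_le (words : List String) (j : Nat) : bLimitGo words j ≤ words.length := by
  fun_induction bLimitGo words j <;> omega

theorem limitGo_ge (words : List String) (j : Nat) :
    min j words.length ≤ bLimitGo words j := by
  fun_induction bLimitGo words j <;> omega

theorem limitGo_not_sep (words : List String) (j : Nat) : ∀ k, j ≤ k →
    k < bLimitGo words j → words.getD k "" ≠ "[sep]" := by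
  fun_induction bLimitGo words j with
  | case1 j hj hsep => intro k h1 h2; omega
  | case2 j hj hnsep ih =>
      intro k h1 h2
      rcases Nat.eq_or_lt_of_le h1 with h | h
      · exact h ▸ hnsep
      · exact ih k h h2
  | case3 j hj =>
      intro k h1 h2; omega

theorem limitGo_sep (words : List String) (j : Nat) :
    bLimitGo words j < words.length → words.getD (bLimitGo words j) "" = "[sep]" := by
  fun_induction bLimitGo words j with
  | case1 j hj hsep => intro _; exact hsep
  | case2 j hj hnsep ih => exact ih
  | case3 j hj => intro h; omega

theorem cond_iff (words : List String) (i : Nat)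
    (h : i < bLimitGo words 1 ∨ i = words.length) :
    (i + 1 < words.length ∧ words.getD (i + 1) "" ≠ "[sep]") ↔ i + 1 < bLimitGo words 1 := by
  have hle := limitGo_le words 1
  constructor
  · rintro ⟨h1, h2⟩
    rcases h with h | h
    · by_contra hnot
      have hEq : bLimitGo words 1 = i + 1 := by omega
      have := limitGo_sep words 1 (by omega)
      rw [hEq] at this
      exact h2 this
    · omega
  · intro h1
    exact ⟨by omega, limitGo_not_sep words 1 (i + 1) (by omega) h1⟩

-- the combined loop invariant: idle state (start = stop = -1) matches B's outer loop,
-- run state (start = s ≥ 0, stop = i + 1, words[i] starts with '#') matches B after its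
-- inner loop plus the pending append
theorem loops_agree (words : List String) : ∀ k i, words.length - i ≤ k →
    (∀ ret, (i < bLimitGo words 1 ∨ i = words.length) →
      aLoop words i (-1) (-1) ret = bOuter words (bLimitGo words 1) i ret) ∧
    (∀ ret (s : Int), i < bLimitGo words 1 →
      pvFirstChar (words.getD i "") = some '#' → 0 ≤ s →
      aLoop words i s ((i : Int) + 1) ret =
        bOuter words (bLimitGo words 1) (bInner words (bLimitGo words 1) i + 1)
          (ret ++ [(s, ((bInner words (bLimitGo words 1) i : Int)) + 1)])) := by
  have hle := limitGo_le words 1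
  intro k
  induction k with
  | zero =>
      intro i hk
      constructor
      · intro ret h
        have hin : i = words.length := by omega
        rw [aLoop, bOuter]
        rw [dif_neg (by omega), dif_neg (by omega)]
        simp
      · intro ret s hiL _ _
        omega
  | succ k ih =>
      intro i hk
      constructor
      · -- idle state
        intro ret h
        rw [aLoop, bOuter]
        by_cases hc : i + 1 < words.length ∧ words.getD (i + 1) "" ≠ "[sep]"
        · have hiL1 : i + 1 < bLimitGo words 1 := (cond_iff words i h).mp hc
          rw [dif_pos hc, dif_pos (by omega)]
          by_cases hb : pvFirstChar (words.getD i "") ≠ some '#' ∧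
              pvFirstChar (words.getD (i + 1) "") = some '#'
          · rw [if_pos hb, if_pos ⟨hiL1, hb⟩]
            have hcast : ((i : Int) + 2) = (((i + 1 : Nat) : Int)) + 1 := by push_cast; ring
            rw [hcast]
            exact (ih (i + 1) (by omega)).2 ret (i : Int) hiL1 hb.2 (by positivity)
          · rw [if_neg hb,
              if_neg (show ¬(pvFirstChar (words.getD (i + 1) "") = some '#' ∧
                (-1 : Int) > -1) by simp),
              if_neg (show ¬((-1 : Int) ≠ -1) by simp),
              if_neg (show ¬(i + 1 < bLimitGo words 1 ∧
                pvFirstChar (words.getD i "") ≠ some '#' ∧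
                pvFirstChar (words.getD (i + 1) "") = some '#') by tauto)]
            exact (ih (i + 1) (by omega)).1 ret (Or.inl hiL1)
        · rw [dif_neg hc, if_neg (show ¬((-1 : Int) ≠ -1) by simp)]
          have hnL : ¬ (i + 1 < bLimitGo words 1) := fun hh => hc ((cond_iff words i h).mpr hh)
          rcases h with h | h
          · rw [dif_pos h, if_neg (by tauto), bOuter, dif_neg (by omega)]
          · rw [dif_neg (by omega)]
      · -- run state
        intro ret s hiL hsh hs
        rw [aLoop]
        have hcond := cond_iff words i (Or.inl hiL)
        by_cases hnext : i + 1 < bLimitGo words 1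
        · rw [dif_pos (hcond.mpr hnext)]
          rw [if_neg (show ¬(pvFirstChar (words.getD i "") ≠ some '#' ∧
            pvFirstChar (words.getD (i + 1) "") = some '#') from fun hx => hx.1 hsh)]
          by_cases hsh1 : pvFirstChar (words.getD (i + 1) "") = some '#'
          · rw [if_pos ⟨hsh1, by omega⟩]
            have hcast : ((i : Int) + 1 + 1) = (((i + 1 : Nat) : Int)) + 1 := by push_cast; ring
            rw [hcast]
            have hrec := (ih (i + 1) (by omega)).2 ret s hnext hsh1 hs
            rw [hrec]
            have hbi : bInner words (bLimitGo words 1) i =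
                bInner words (bLimitGo words 1) (i + 1) := by
              rw [bInner, dif_pos ⟨hnext, hsh1⟩]
            rw [hbi]
          · rw [if_neg (by tauto), if_pos (show s ≠ -1 by omega)]
            have hbi : bInner words (bLimitGo words 1) i = i := by
              rw [bInner, dif_neg (by tauto)]
            rw [hbi]
            exact (ih (i + 1) (by omega)).1 (ret ++ [(s, (i : Int) + 1)]) (Or.inl hnext)
        · rw [dif_neg (fun hh => hnext (hcond.mp hh)), if_pos (show s ≠ -1 by omega)]
          have hbi : bInner words (bLimitGo words 1) i = i := by
            rw [bInner, dif_neg (by tauto)]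
          rw [hbi, bOuter, dif_neg hnext]

-- ===== VERDICT (by name: the statement is the Claim_ definition above) =====
theorem get_combined_idxs_spec : Claim_equal_get_combined_idxs := by
  intro words _ _
  unfold Spec_get_combined_idxs get_combined_idxs get_combined_idxs_alt
  have hge := limitGo_ge words 1
  apply (loops_agree words words.length 0 (by omega)).1
  by_cases hn : words.length = 0
  · right; omega
  · left; omega
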